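-- pv_equiv track=rewrite | github.com/olsenw/LeetCodeExercises | Python3/sum_of_two_integers.py | getSum_fails
-- ===== SOURCE A (Python) =====
-- def getSum_fails(a: int, b: int) -> int:
--     answer = 0
--     carry = 0
--     for i in range(32):
--         z = 1 << i
--         x = a & z
--         y = b & z
--         if x == y == 0:
--             answer |= carry
--             carry = 0
--         elif x == y == z:
--             answer |= carry
--             carry = 1 << (i+1)
--         elif carry:
--             carry = 1 << (i+1)
--         else:
--             answer |= 1 << i
--             carry = 0
--     return answer | carry
-- ===== SOURCE B (Python) =====
-- def getSum_fails(a: int, b: int) -> int: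
--     # closed form: the 32-iteration carry loop reconstructs the sum of the
--     # low 32 bits of each operand (including the carry out of bit 31)
--     return (a & 0xFFFFFFFF) + (b & 0xFFFFFFFF)
-- ===== Notes on version B (the rewrite author's own statement) =====
-- stated objective: simpler
-- what changed: Replaced the 32-iteration bitwise ripple-carry loop with the closed form (a & 0xFFFFFFFF) + (b & 0xFFFFFFFF), which equals the sum of the low 32 bits of both operands including the carry into bit 32.
import Mathlib
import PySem

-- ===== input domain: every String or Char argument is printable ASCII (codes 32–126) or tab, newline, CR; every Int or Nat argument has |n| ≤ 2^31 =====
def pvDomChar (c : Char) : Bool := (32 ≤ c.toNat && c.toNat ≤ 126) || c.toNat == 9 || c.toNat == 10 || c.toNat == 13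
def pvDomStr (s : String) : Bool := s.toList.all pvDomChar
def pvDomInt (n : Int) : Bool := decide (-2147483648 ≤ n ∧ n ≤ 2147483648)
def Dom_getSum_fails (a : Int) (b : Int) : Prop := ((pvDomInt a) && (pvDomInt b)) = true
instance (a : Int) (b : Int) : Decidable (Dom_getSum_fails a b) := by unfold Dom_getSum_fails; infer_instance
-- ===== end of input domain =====

-- B replaces the 32-iteration bitwise ripple-carry loop with the closed form
-- (a & 0xFFFFFFFF) + (b & 0xFFFFFFFF): simpler, same value for all integers.


-- ===== PORT A =====
-- one iteration of A's loop body; state = (answer, carry), i the loop index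
def getSum_failsStep (a : Int) (b : Int) (s : Int × Int) (i : Nat) : Int × Int :=
  let z : Int := 1 <<< i
  let x : Int := PySem.Int.band a z
  let y : Int := PySem.Int.band b z
  if x = y ∧ y = 0 then (PySem.Int.bor s.1 s.2, 0)
  else if x = y ∧ y = z then (PySem.Int.bor s.1 s.2, 1 <<< (i + 1))
  else if s.2 ≠ 0 then (s.1, 1 <<< (i + 1))
  else (PySem.Int.bor s.1 (1 <<< i), 0)

def getSum_fails (a : Int) (b : Int) : Int :=
  let r := (List.range 32).foldl (getSum_failsStep a b) (0, 0)
  PySem.Int.bor r.1 r.2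

-- ===== PORT B =====
def getSum_fails_alt (a : Int) (b : Int) : Int :=
  PySem.Int.band a 0xFFFFFFFF + PySem.Int.band b 0xFFFFFFFF

-- ===== PRECONDITION & SPEC =====
def Spec_getSum_fails (a : Int) (b : Int) (out : Int) : Prop := out = getSum_fails_alt a b
instance (a : Int) (b : Int) (out : Int) : Decidable (Spec_getSum_fails a b out) := by unfold Spec_getSum_fails; infer_instance

-- ===== CLAIM (what is proved, stated in full; the proofs are below) =====
def Claim_equal_getSum_fails : Prop := ∀ (a : Int) (b : Int), Dom_getSum_fails a b → Spec_getSum_fails a b (getSum_fails a b)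

-- ===== LEMMAS AND PROOFS =====

theorem pv_band_two_pow (a : Int) (k : Nat) :
    PySem.Int.band a (2 ^ k) = 2 ^ k * ((a / 2 ^ k) % 2) := by
  rw [show ((2:Int)^k) = ((2^k : Nat) : Int) by push_cast; ring]
  by_cases ha : 0 ≤ a
  · obtain ⟨n, rfl⟩ := Int.eq_ofNat_of_zero_le ha
    rw [PySem.Int.band_natCast, Nat.and_two_pow, Nat.testBit_eq_decide_div_mod_eq]
    have hc : ((n:Int) / ((2^k:Nat):Int)) % 2 = ((n / 2^k : Nat) : Int) % 2 := by push_cast; rfl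
    rw [hc, show (((n / 2^k : Nat)) : Int) % 2 = (((n / 2^k) % 2 : Nat) : Int) by push_cast; rfl]
    rcases Nat.mod_two_eq_zero_or_one (n / 2^k) with h | h <;> simp [h]
  · have hn : a = -((-a-1).toNat : Int) - 1 := by omega
    set n : Nat := (-a-1).toNat with hdef
    have hb : PySem.Int.band a ((2^k : Nat) : Int) = ((2^k - (2^k &&& n) : Nat) : Int) := by
      unfold PySem.Int.band
      rw [if_neg (by omega), if_pos (by positivity)]
      have h1 : ((2^k : Nat) : Int).toNat = 2^k := Int.toNat_natCast _
      have h2 : (-a - 1).toNat = n := rfl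
      rw [h1, h2]
    rw [hb, Nat.land_comm, Nat.and_two_pow, Nat.testBit_eq_decide_div_mod_eq]
    -- a / 2^k = -(n/2^k) - 1
    have hq : a / ((2^k : Nat) : Int) = -((n / 2^k : Nat) : Int) - 1 := by
      have h5 : (0:Int) < ((2^k : Nat) : Int) := by positivity
      have := Int.ediv_emod_unique (a := a) (b := ((2^k : Nat) : Int))
        (q := -((n / 2^k : Nat) : Int) - 1) (r := ((2^k : Nat) : Int) - 1 - ((n % 2^k : Nat) : Int)) h5
      have hmod := Nat.mod_lt n (y := 2^k) (by positivity)
      have hdm : ((n / 2^k : Nat) : Int) * ((2^k : Nat) : Int) + ((n % 2^k : Nat) : Int) = (n : Int) := by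
        push_cast; rw [mul_comm]; exact_mod_cast congrArg (Nat.cast : Nat → Int) (Nat.div_add_mod n (2^k))
      exact (this.mpr (by constructor <;> [nlinarith [hn] ; omega])).1
    rw [hq]
    have h6 : (-((n / 2^k : Nat) : Int) - 1) % 2 = 1 - (((n / 2^k) % 2 : Nat) : Int) := by
      rw [show (((n / 2^k) % 2 : Nat) : Int) = ((n / 2^k : Nat) : Int) % 2 by push_cast; rfl]
      omega
    rw [h6]
    rcases Nat.mod_two_eq_zero_or_one (n / 2^k) with h | h <;>
      · rw [h]; push_cast [Nat.and_two_pow, Nat.testBit_eq_decide_div_mod_eq, h]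
        simp

theorem pv_band_mask (a : Int) :
    PySem.Int.band a 0xFFFFFFFF = a % 2 ^ 32 := by
  rw [show (0xFFFFFFFF:Int) = ((2^32 - 1 : Nat) : Int) by norm_num]
  by_cases ha : 0 ≤ a
  · obtain ⟨n, rfl⟩ := Int.eq_ofNat_of_zero_le ha
    rw [PySem.Int.band_natCast, Nat.and_two_pow_sub_one_eq_mod]
    rw [show ((n % 2^32 : Nat) : Int) = (n:Int) % 2^32 by push_cast; rfl]
  · have hn : a = -((-a-1).toNat : Int) - 1 := by omega
    set n : Nat := (-a-1).toNat with hdef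
    have hb : PySem.Int.band a ((2^32 - 1 : Nat) : Int) = (((2^32 - 1) - ((2^32 - 1) &&& n) : Nat) : Int) := by
      unfold PySem.Int.band
      rw [if_neg (by omega), if_pos (by positivity)]
      have h1 : ((2^32 - 1 : Nat) : Int).toNat = 2^32 - 1 := Int.toNat_natCast _
      have h2 : (-a - 1).toNat = n := rfl
      rw [h1, h2]
    rw [hb, Nat.land_comm, Nat.and_two_pow_sub_one_eq_mod]
    have hm : n % 2^32 < 2^32 := Nat.mod_lt _ (by positivity)
    have hq : a % ((2:Int)^32) = (2^32 : Int) - 1 - ((n % 2^32 : Nat) : Int) := by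
      have h5 : (0:Int) < (2:Int)^32 := by positivity
      have := Int.ediv_emod_unique (a := a) (b := (2:Int)^32)
        (q := -((n / 2^32 : Nat) : Int) - 1) (r := (2^32 : Int) - 1 - ((n % 2^32 : Nat) : Int)) h5
      have hdm : ((n / 2^32 : Nat) : Int) * ((2:Int)^32) + ((n % 2^32 : Nat) : Int) = (n : Int) := by
        push_cast; rw [mul_comm]; exact_mod_cast congrArg (Nat.cast : Nat → Int) (Nat.div_add_mod n (2^32))
      exact (this.mpr (by constructor <;> [nlinarith [hn] ; omega])).2
    rw [hq]
    push_cast [Nat.sub_sub]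
    omega

theorem pv_emod_two_pow_succ (a : Int) (k : Nat) :
    a % 2 ^ (k + 1) = a % 2 ^ k + 2 ^ k * ((a / 2 ^ k) % 2) := by
  have hz : (0:Int) < 2 ^ k := by positivity
  have h1 : (2:Int) ^ k * (a / 2 ^ k) + a % 2 ^ k = a := Int.mul_ediv_add_emod a (2 ^ k)
  have h2 : (2:Int) * ((a / 2 ^ k) / 2) + (a / 2 ^ k) % 2 = a / 2 ^ k := Int.mul_ediv_add_emod _ 2
  have hr0 : 0 ≤ a % 2 ^ k := Int.emod_nonneg a (by positivity)
  have hr1 : a % 2 ^ k < 2 ^ k := Int.emod_lt_of_pos a hz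
  have hb : (a / 2 ^ k) % 2 = 0 ∨ (a / 2 ^ k) % 2 = 1 := by omega
  have hs : (2:Int) ^ (k+1) = 2 ^ k * 2 := by ring
  have key : a = 2 ^ (k+1) * ((a / 2 ^ k) / 2) + (a % 2 ^ k + 2 ^ k * ((a / 2 ^ k) % 2)) := by
    rw [hs]; nlinarith [h1, h2]
  conv_lhs => rw [key]
  rw [add_comm, Int.add_mul_emod_self_left]
  apply Int.emod_eq_of_lt
  · rcases hb with h | h <;> rw [h] <;> nlinarith
  · rcases hb with h | h <;> rw [h, hs] <;> nlinarith

theorem pv_bor_two_pow (u : Int) (k : Nat) (h0 : 0 ≤ u) (h1 : u < 2 ^ k) :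
    PySem.Int.bor u (2 ^ k) = u + 2 ^ k := by
  rw [show ((2:Int)^k) = ((2^k : Nat) : Int) by push_cast; ring,
      PySem.Int.bor_of_nonneg h0 (by positivity)]
  have hc : ((2^k : Nat) : Int) = (2:Int)^k := by push_cast; ring
  have ht : u.toNat < 2 ^ k := by omega
  have h2 : ((2^k : Nat) : Int).toNat = 2^k := Int.toNat_natCast _
  rw [h2]
  have h3 := Nat.shiftLeft_add_eq_or_of_lt (b := u.toNat) ht 1
  rw [Nat.shiftLeft_eq, one_mul] at h3
  rw [Nat.lor_comm, ← h3]
  push_cast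
  omega

theorem pv_one_shiftLeft (k : Nat) : (((1 <<< k : Nat) : Int)) = 2 ^ k := by
  rw [Nat.shiftLeft_eq, one_mul]; push_cast; ring

theorem pv_md (M v t : Int) (hM : 0 < M) (h0 : 0 ≤ v) (h1 : v < M) :
    (v + M * t) % M = v ∧ (v + M * t) / M = t := by
  constructor
  · rw [Int.add_mul_emod_self_left]; exact Int.emod_eq_of_lt h0 h1
  · rw [Int.add_mul_ediv_left _ _ hM.ne', Int.ediv_eq_zero_of_lt h0 h1, zero_add]

theorem pv_invariant (a b : Int) (k : Nat) :
    (List.range k).foldl (getSum_failsStep a b) (0, 0) =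
      ((a % 2 ^ k + b % 2 ^ k) % 2 ^ k, 2 ^ k * ((a % 2 ^ k + b % 2 ^ k) / 2 ^ k)) := by
  induction k with
  | zero => simp
  | succ k ih =>
    rw [List.range_succ, List.foldl_append, ih, List.foldl_cons, List.foldl_nil]
    have hM : (0:Int) < 2 ^ k := by positivity
    have hN : (2:Int) ^ (k+1) = 2 ^ k * 2 := by ring
    have hA2 := pv_emod_two_pow_succ a k
    have hB2 := pv_emod_two_pow_succ b k
    have hα : (a / 2 ^ k) % 2 = 0 ∨ (a / 2 ^ k) % 2 = 1 := by omega
    have hβ : (b / 2 ^ k) % 2 = 0 ∨ (b / 2 ^ k) % 2 = 1 := by omega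
    have hra : 0 ≤ a % 2 ^ k ∧ a % 2 ^ k < 2 ^ k := ⟨Int.emod_nonneg a hM.ne', Int.emod_lt_of_pos a hM⟩
    have hrb : 0 ≤ b % 2 ^ k ∧ b % 2 ^ k < 2 ^ k := ⟨Int.emod_nonneg b hM.ne', Int.emod_lt_of_pos b hM⟩
    have hg := Int.mul_ediv_add_emod (a % 2 ^ k + b % 2 ^ k) (2 ^ k)
    have hr : 0 ≤ (a % 2 ^ k + b % 2 ^ k) % 2 ^ k ∧ (a % 2 ^ k + b % 2 ^ k) % 2 ^ k < 2 ^ k :=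
      ⟨Int.emod_nonneg _ hM.ne', Int.emod_lt_of_pos _ hM⟩
    have hd : (a % 2 ^ k + b % 2 ^ k) / 2 ^ k = 0 ∨ (a % 2 ^ k + b % 2 ^ k) / 2 ^ k = 1 := by
      have h0 : 0 ≤ (a % 2 ^ k + b % 2 ^ k) / 2 ^ k := Int.ediv_nonneg (by omega) hM.le
      have h1 : (a % 2 ^ k + b % 2 ^ k) / 2 ^ k < 2 := by
        rw [Int.ediv_lt_iff_lt_mul hM]; omega
      omega
    unfold getSum_failsStep
    simp only [pv_one_shiftLeft, pv_band_two_pow]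
    split_ifs with h1 h2 h3
    · -- both bits 0: flush carry, new carry 0
      rcases hα with ha0 | ha0 <;> rcases hβ with hb0 | hb0 <;>
          simp only [ha0, hb0, mul_zero, mul_one, add_zero, true_and, and_true] at h1 hA2 hB2 <;> try (exfalso; omega)
      have e1 : a % 2 ^ (k+1) + b % 2 ^ (k+1) = (a % 2 ^ k + b % 2 ^ k) + 2 ^ (k+1) * 0 := by omega
      have hv := pv_md (2 ^ (k+1)) (a % 2 ^ k + b % 2 ^ k) 0 (by positivity) (by omega) (by omega)
      rw [Prod.mk.injEq, e1, hv.1, hv.2, mul_zero]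
      refine ⟨?_, rfl⟩
      rcases hd with hg0 | hg0
      · rw [hg0] at hg; rw [hg0, mul_zero, PySem.Int.bor_zero]; omega
      · rw [hg0] at hg; rw [hg0, mul_one, pv_bor_two_pow _ k hr.1 hr.2]; omega
    · -- both bits 1: flush carry, carry out
      rcases hα with ha0 | ha0 <;> rcases hβ with hb0 | hb0 <;>
          simp only [ha0, hb0, mul_zero, mul_one, add_zero, true_and, and_true] at h2 hA2 hB2 <;> try (exfalso; omega)
      have e1 : a % 2 ^ (k+1) + b % 2 ^ (k+1) = (a % 2 ^ k + b % 2 ^ k) + 2 ^ (k+1) * 1 := by omega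
      have hv := pv_md (2 ^ (k+1)) (a % 2 ^ k + b % 2 ^ k) 1 (by positivity) (by omega) (by omega)
      rw [Prod.mk.injEq, e1, hv.1, hv.2, mul_one]
      refine ⟨?_, rfl⟩
      rcases hd with hg0 | hg0
      · rw [hg0] at hg; rw [hg0, mul_zero, PySem.Int.bor_zero]; omega
      · rw [hg0] at hg; rw [hg0, mul_one, pv_bor_two_pow _ k hr.1 hr.2]; omega
    · -- bits differ, carry pending: keep answer, carry out
      have hg1 : (a % 2 ^ k + b % 2 ^ k) / 2 ^ k = 1 := by
        rcases hd with h | h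
        · exact absurd (by rw [h, mul_zero]) h3
        · exact h
      rw [hg1] at hg
      rcases hα with ha0 | ha0 <;> rcases hβ with hb0 | hb0 <;>
          simp only [ha0, hb0, mul_zero, mul_one, add_zero, true_and, and_true, not_true] at h1 h2 hA2 hB2
      all_goals {
        have e1 : a % 2 ^ (k+1) + b % 2 ^ (k+1) =
            (a % 2 ^ k + b % 2 ^ k) % 2 ^ k + 2 ^ (k+1) * 1 := by omega
        have hv := pv_md (2 ^ (k+1)) ((a % 2 ^ k + b % 2 ^ k) % 2 ^ k) 1 (by positivity)
          (by omega) (by omega)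
        rw [Prod.mk.injEq, e1, hv.1, hv.2, mul_one]
        exact ⟨rfl, rfl⟩ }
    · -- bits differ, no carry: set bit k
      have hg0 : (a % 2 ^ k + b % 2 ^ k) / 2 ^ k = 0 := by
        rcases hd with h | h
        · exact h
        · exfalso; apply h3; rw [h, mul_one] at *; omega
      rw [hg0] at hg
      rcases hα with ha0 | ha0 <;> rcases hβ with hb0 | hb0 <;>
          simp only [ha0, hb0, mul_zero, mul_one, add_zero, true_and, and_true, not_true] at h1 h2 hA2 hB2
      all_goals {
        have e1 : a % 2 ^ (k+1) + b % 2 ^ (k+1) =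
            ((a % 2 ^ k + b % 2 ^ k) % 2 ^ k + 2 ^ k) + 2 ^ (k+1) * 0 := by omega
        have hv := pv_md (2 ^ (k+1)) ((a % 2 ^ k + b % 2 ^ k) % 2 ^ k + 2 ^ k) 0 (by positivity)
          (by omega) (by omega)
        rw [Prod.mk.injEq, e1, hv.1, hv.2, mul_zero, pv_bor_two_pow _ k hr.1 hr.2]
        exact ⟨rfl, rfl⟩ }

-- ===== VERDICT (by name: the statement is the Claim_ definition above) =====
theorem getSum_fails_spec : Claim_equal_getSum_fails := by
  intro a b _
  unfold Spec_getSum_fails getSum_fails getSum_fails_alt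
  simp only [pv_invariant, pv_band_mask]
  have hM : (0:Int) < 2 ^ 32 := by positivity
  have hg := Int.mul_ediv_add_emod (a % 2 ^ 32 + b % 2 ^ 32) (2 ^ 32)
  have hr : 0 ≤ (a % 2 ^ 32 + b % 2 ^ 32) % 2 ^ 32 ∧ (a % 2 ^ 32 + b % 2 ^ 32) % 2 ^ 32 < 2 ^ 32 :=
    ⟨Int.emod_nonneg _ hM.ne', Int.emod_lt_of_pos _ hM⟩
  have hra : 0 ≤ a % 2 ^ 32 ∧ a % 2 ^ 32 < 2 ^ 32 := ⟨Int.emod_nonneg a hM.ne', Int.emod_lt_of_pos a hM⟩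
  have hrb : 0 ≤ b % 2 ^ 32 ∧ b % 2 ^ 32 < 2 ^ 32 := ⟨Int.emod_nonneg b hM.ne', Int.emod_lt_of_pos b hM⟩
  have hd : (a % 2 ^ 32 + b % 2 ^ 32) / 2 ^ 32 = 0 ∨ (a % 2 ^ 32 + b % 2 ^ 32) / 2 ^ 32 = 1 := by
    have h0 : 0 ≤ (a % 2 ^ 32 + b % 2 ^ 32) / 2 ^ 32 := Int.ediv_nonneg (by omega) hM.le
    have h1 : (a % 2 ^ 32 + b % 2 ^ 32) / 2 ^ 32 < 2 := by
      rw [Int.ediv_lt_iff_lt_mul hM]; omega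
    omega
  rcases hd with hg0 | hg0
  · rw [hg0] at hg; rw [hg0, mul_zero, PySem.Int.bor_zero]; omega
  · rw [hg0] at hg; rw [hg0, mul_one, pv_bor_two_pow _ 32 hr.1 hr.2]; omega
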